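-- pv_equiv track=rewrite | github.com/Cyril-44/C-Cpp | !Luogu/T725270_NNOI/gen.py | blocks_descending
-- ===== SOURCE A (Python) =====
-- def blocks_descending(n: int, block: int) -> tuple[list[int], int]:
--     """
--     把值域分成块，每块内部递增，但块与块按值域从大到小拼接：
--       例如 block=3：
--         [n-2,n-1,n,  n-5,n-4,n-3,  ...]
--     这样任何跨块三元组都不可能满足 a_i < a_j，
--     所以解只可能完全落在同一块内部。
--     - block=3：每块正好贡献 1 个 (p,p+1,p+2) -> ans = floor(n/3)
--     - block=4：每块贡献 2 个 (p,p+1,p+2) 与 (p+1,p+2,p+3) -> ans = 2*floor(n/4)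
--     """
--     assert block in (3, 4)
--     perm = []
--     t = n // block
--     for b in range(t, 0, -1):
--         L = (b - 1) * block + 1
--         R = b * block
--         perm.extend(range(L, R + 1))
--     # 剩余尾巴（小值）放最后
--     perm.extend(range(t * block + 1, n + 1))
--
--     if block == 3:
--         ans = t
--     else:
--         ans = 2 * t
--     return perm, ans
-- ===== SOURCE B (Python) =====
-- def blocks_descending(n: int, block: int) -> tuple[list[int], int]:
--     assert block in (3, 4)
--     t = n // block
--     head = [(t - p // block - 1) * block + 1 + p % block for p in range(t * block)]
--     tail = list(range(t * block + 1, n + 1))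
--     return head + tail, t * (block - 2)
-- ===== Notes on version B (the rewrite author's own statement) =====
-- stated objective: alternative
-- what changed: Instead of concatenating per-block ranges in a descending loop, B computes each head element directly from its position p via j = p//block, offset = p%block (one index-driven comprehension), and replaces the if/else on block by the closed form ans = t*(block-2).
import Mathlib
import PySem

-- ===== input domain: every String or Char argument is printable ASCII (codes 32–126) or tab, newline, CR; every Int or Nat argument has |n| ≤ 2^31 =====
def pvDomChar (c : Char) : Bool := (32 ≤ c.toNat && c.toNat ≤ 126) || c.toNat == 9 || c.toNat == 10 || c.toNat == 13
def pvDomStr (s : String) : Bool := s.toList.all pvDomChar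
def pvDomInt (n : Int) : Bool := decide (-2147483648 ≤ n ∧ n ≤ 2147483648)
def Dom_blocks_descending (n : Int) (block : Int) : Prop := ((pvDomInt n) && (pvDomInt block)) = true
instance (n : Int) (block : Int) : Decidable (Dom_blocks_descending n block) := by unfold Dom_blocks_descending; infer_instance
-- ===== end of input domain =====

-- B computes each head element from its position (one comprehension) and ans by the
-- closed form t*(block-2), instead of A's descending loop concatenating per-block ranges.

-- ===== PORT A =====
def blocks_descending (n : Int) (block : Int) : List Int × Int :=
  let t := PySem.Int.floordiv n block
  let perm : List Int :=
    (PySem.List.pyRange t 0 (-1)).foldl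
      (fun acc b =>
        let L := (b - 1) * block + 1
        let R := b * block
        acc ++ PySem.List.pyRange L (R + 1) 1) []
  let perm := perm ++ PySem.List.pyRange (t * block + 1) (n + 1) 1
  (perm, if block = 3 then t else 2 * t)

-- ===== PORT B =====
def blocks_descending_alt (n : Int) (block : Int) : List Int × Int :=
  let t := PySem.Int.floordiv n block
  let head : List Int :=
    (PySem.List.pyRange 0 (t * block) 1).map
      (fun p => (t - PySem.Int.floordiv p block - 1) * block + 1 + PySem.Int.mod p block)
  let tail := PySem.List.pyRange (t * block + 1) (n + 1) 1
  (head ++ tail, t * (block - 2))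

-- ===== PRECONDITION & SPEC =====
-- Pre_ excludes exactly the inputs on which A's assert (block must be 3 or 4) raises AssertionError.
def Pre_blocks_descending (n : Int) (block : Int) : Prop := block = 3 ∨ block = 4
instance (n : Int) (block : Int) : Decidable (Pre_blocks_descending n block) := by
  unfold Pre_blocks_descending; infer_instance
def pvWitness_blocks_descending : Int × Int := (12, 3)

def Spec_blocks_descending (n : Int) (block : Int) (out : List Int × Int) : Prop := out = blocks_descending_alt n block
instance (n : Int) (block : Int) (out : List Int × Int) : Decidable (Spec_blocks_descending n block out) := by unfold Spec_blocks_descending; infer_instance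

-- ===== CLAIM (what is proved, stated in full; the proofs are below) =====
def Claim_equal_blocks_descending : Prop := ∀ (n : Int) (block : Int), Dom_blocks_descending n block → Pre_blocks_descending n block → Spec_blocks_descending n block (blocks_descending n block)

-- ===== LEMMAS AND PROOFS =====

-- A's head, written as a flatMap over the descending block list.
theorem headA_eq_flatMap (t block : Int) :
    (PySem.List.pyRange t 0 (-1)).foldl
      (fun acc b =>
        let L := (b - 1) * block + 1
        let R := b * block
        acc ++ PySem.List.pyRange L (R + 1) 1) [] =
    (PySem.List.pyRange t 0 (-1)).flatMap
      (fun b => PySem.List.pyRange ((b - 1) * block + 1) (b * block + 1) 1) := by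
  simpa using PySem.List.foldl_append_eq_flatMap
    (fun b => PySem.List.pyRange ((b - 1) * block + 1) (b * block + 1) 1)
    (PySem.List.pyRange t 0 (-1)) []

-- core: the descending-block concatenation equals the positional comprehension, for t = k in Nat.
theorem head_key (block : Int) (hb : 0 < block) : ∀ (k : Nat),
    (PySem.List.pyRange (k : Int) 0 (-1)).flatMap
      (fun b => PySem.List.pyRange ((b - 1) * block + 1) (b * block + 1) 1) =
    (PySem.List.pyRange 0 ((k : Int) * block) 1).map
      (fun p => ((k : Int) - PySem.Int.floordiv p block - 1) * block + 1 + PySem.Int.mod p block) := by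
  intro k
  induction k with
  | zero =>
      simp [PySem.List.pyRange_neg_one_eq_nil, PySem.List.pyRange_one_eq_nil]
  | succ m ih =>
      simp only [Nat.cast_add, Nat.cast_one] at *
      have hk1 : (0:Int) < (m:Int) + 1 := by positivity
      rw [PySem.List.pyRange_neg_one_cons hk1, List.flatMap_cons]
      have hm1 : ((m:Int) + 1 - 1) = (m:Int) := by ring
      rw [hm1, ih]
      have hbb : block ≤ ((m:Int) + 1) * block := by nlinarith [Int.natCast_nonneg m]
      have hsplit : PySem.List.pyRange 0 (((m:Int) + 1) * block) 1 =
          PySem.List.pyRange 0 block 1 ++ PySem.List.pyRange block (((m:Int) + 1) * block) 1 :=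
        PySem.List.pyRange_one_append 0 block _ (le_of_lt hb) hbb
      rw [hsplit, List.map_append]
      congr 1
      · -- first block: positions 0..block-1 yield values m*block+1 .. (m+1)*block
        apply List.ext_getElem
        · simp only [List.length_map, PySem.List.length_pyRange_one]
          have : ((m:Int) + 1) * block + 1 - ((m:Int) * block + 1) = block - 0 := by ring
          rw [this]
        · intro i h1 h2
          simp only [List.getElem_map, PySem.List.getElem_pyRange_one]
          have hE : ((m:Int) + 1) * block + 1 - ((m:Int) * block + 1) = block := by ring
          have hi2 : (i:Int) < block := by
            simp only [List.length_map, PySem.List.length_pyRange_one, hE] at h1 h2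
            omega
          have hdiv : PySem.Int.floordiv ((0:Int) + i) block = 0 := by
            rw [PySem.Int.floordiv_eq_iff_of_pos hb]
            constructor
            · simpa using Int.natCast_nonneg i
            · simpa using hi2
          have hmod : PySem.Int.mod ((0:Int) + i) block = (0:Int) + i := by
            have h := PySem.Int.floordiv_mul_add_mod ((0:Int) + i) block
            rw [hdiv] at h; omega
          rw [hdiv, hmod]
          ring
      · -- remaining positions: shift by block and reuse the m-block identity
        apply List.ext_getElem
        · simp only [List.length_map, PySem.List.length_pyRange_one]
          have : ((m:Int) + 1) * block - block = (m:Int) * block - 0 := by ring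
          rw [this]
        · intro i h1 h2
          simp only [List.getElem_map, PySem.List.getElem_pyRange_one]
          have hb' : block ≠ 0 := ne_of_gt hb
          have e1 : block + (i:Int) = (0 + i) + block * 1 := by ring
          have hdiv : PySem.Int.floordiv (block + i) block = PySem.Int.floordiv ((0:Int) + i) block + 1 := by
            rw [PySem.Int.floordiv_eq_ediv_of_pos hb, PySem.Int.floordiv_eq_ediv_of_pos hb,
              e1, Int.add_mul_ediv_left _ _ hb']
          have hmod : PySem.Int.mod (block + i) block = PySem.Int.mod ((0:Int) + i) block := by
            rw [PySem.Int.mod_eq_emod_of_pos hb, PySem.Int.mod_eq_emod_of_pos hb,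
              e1, Int.add_mul_emod_self_left]
          rw [hdiv, hmod]
          ring

-- ===== VERDICT (by name: the statement is the Claim_ definition above) =====
theorem blocks_descending_spec : Claim_equal_blocks_descending := by
  intro n block hdom hpre
  unfold Spec_blocks_descending blocks_descending blocks_descending_alt
  have hb : (0:Int) < block := by rcases hpre with h | h <;> omega
  set t := PySem.Int.floordiv n block with ht
  show ((PySem.List.pyRange t 0 (-1)).foldl
          (fun acc b =>
            let L := (b - 1) * block + 1
            let R := b * block
            acc ++ PySem.List.pyRange L (R + 1) 1) []
        ++ PySem.List.pyRange (t * block + 1) (n + 1) 1,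
        if block = 3 then t else 2 * t) =
       ((PySem.List.pyRange 0 (t * block) 1).map
          (fun p => (t - PySem.Int.floordiv p block - 1) * block + 1 + PySem.Int.mod p block)
        ++ PySem.List.pyRange (t * block + 1) (n + 1) 1,
        t * (block - 2))
  have hhead :
      (PySem.List.pyRange t 0 (-1)).foldl
        (fun acc b =>
          let L := (b - 1) * block + 1
          let R := b * block
          acc ++ PySem.List.pyRange L (R + 1) 1) [] =
      (PySem.List.pyRange 0 (t * block) 1).map
        (fun p => (t - PySem.Int.floordiv p block - 1) * block + 1 + PySem.Int.mod p block) := by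
    rw [headA_eq_flatMap]
    rcases le_or_gt t 0 with hle | hgt
    · have h1 : PySem.List.pyRange t 0 (-1) = [] := PySem.List.pyRange_neg_one_eq_nil hle
      have h2 : PySem.List.pyRange 0 (t * block) 1 = [] := by
        apply PySem.List.pyRange_one_eq_nil
        nlinarith
      rw [h1, h2]; rfl
    · obtain ⟨k, hk⟩ : ∃ k : Nat, t = (k : Int) := ⟨t.toNat, (Int.toNat_of_nonneg (le_of_lt hgt)).symm⟩
      rw [hk]
      exact head_key block hb k
  have hans : (if block = 3 then t else 2 * t) = t * (block - 2) := by
    rcases hpre with h | h <;> (simp [h]; try ring)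
  rw [hhead, hans]
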